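-- pv_equiv track=rewrite | github.com/kaslock/problem-solving | Programmers/[Hash]위장.py | solution
-- ===== SOURCE A (Python) =====
-- from collections import defaultdict
--
-- def solution(clothes):
--     answer = 1
--
--     dd = defaultdict(int)
--
--     for c in clothes:
--         dd[c[1]] += 1
--
--     for k in dd.keys():
--         answer *= (dd[k] + 1)
--     return answer - 1
-- ===== SOURCE B (Python) =====
-- def solution(clothes):
--     # Partition recursion (iteratively): repeatedly take the first remaining
--     # category, count its items by filtering them out, multiply (count+1).
--     cats = [c[1] for c in clothes]
--     answer = 1
--     while cats:
--         k = cats[0]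
--         rest = [x for x in cats if x != k]
--         answer *= len(cats) - len(rest) + 1
--         cats = rest
--     return answer - 1
-- ===== Notes on version B (the rewrite author's own statement) =====
-- stated objective: alternative
-- what changed: Replaces the defaultdict counting pass plus a second pass over the dict keys with a single partition loop: repeatedly take the first remaining category, remove all its items by filtering, and multiply the running answer by (removed count + 1); no hash table is maintained.
import Mathlib
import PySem

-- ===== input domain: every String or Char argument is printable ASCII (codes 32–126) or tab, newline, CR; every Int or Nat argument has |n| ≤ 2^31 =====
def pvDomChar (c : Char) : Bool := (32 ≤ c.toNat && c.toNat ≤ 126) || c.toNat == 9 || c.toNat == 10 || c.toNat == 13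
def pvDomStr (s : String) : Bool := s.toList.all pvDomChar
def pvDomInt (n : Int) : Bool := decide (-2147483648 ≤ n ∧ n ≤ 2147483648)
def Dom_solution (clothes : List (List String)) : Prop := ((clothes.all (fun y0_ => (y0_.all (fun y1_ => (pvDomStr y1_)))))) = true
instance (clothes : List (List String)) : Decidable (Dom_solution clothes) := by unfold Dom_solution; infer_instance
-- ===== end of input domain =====

-- B replaces A's defaultdict counting pass + second pass over the dict keys with a
-- single partition loop over the category list (no hash table); alternative algorithm, equal results.


-- ===== PORT A =====
-- dd[c[1]] += 1 for each c in clothes; then answer *= dd[k] + 1 over dd.keys(); return answer - 1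
def solution (clothes : List (List String)) : Int :=
  let dd : PySem.Dict String Int :=
    clothes.foldl (fun d c => d.modify (PySem.List.pyGetD c 1 "") 0 (· + 1)) PySem.Dict.empty
  let answer : Int := dd.keys.foldl (fun a k => a * (dd.getD k 0 + 1)) 1
  answer - 1

-- ===== PORT B =====
-- while cats: k = cats[0]; rest = [x for x in cats if x != k]; answer *= len(cats) - len(rest) + 1; cats = rest
def solution_alt_loop : List String → Int → Int
  | [], answer => answer
  | k :: cs, answer =>
    let rest := (k :: cs).filter (fun x => decide (x ≠ k))
    solution_alt_loop rest (answer * (((k :: cs).length : Int) - (rest.length : Int) + 1))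
termination_by cats _ => cats.length
decreasing_by
  simp only [List.filter_cons, decide_not]
  simp only [List.length_cons]
  have := List.length_filter_le (fun x => !(x == k)) cs
  simp
  omega

-- cats = [c[1] for c in clothes]; return (loop answer over cats starting from 1) - 1
def solution_alt (clothes : List (List String)) : Int :=
  solution_alt_loop (clothes.map (fun c => PySem.List.pyGetD c 1 "")) 1 - 1

-- ===== PRECONDITION & SPEC =====
-- Pre excludes exactly the inputs on which A raises IndexError: some item has fewer than 2 entries, so c[1] is out of range.
def Pre_solution (clothes : List (List String)) : Prop := ∀ c ∈ clothes, 2 ≤ c.length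
instance (clothes : List (List String)) : Decidable (Pre_solution clothes) := by unfold Pre_solution; infer_instance
def pvWitness_solution : List (List String) := [["yellow_hat", "headgear"], ["blue_sunglasses", "eyewear"], ["green_turban", "headgear"]]

def Spec_solution (clothes : List (List String)) (out : Int) : Prop := out = solution_alt clothes
instance (clothes : List (List String)) (out : Int) : Decidable (Spec_solution clothes out) := by unfold Spec_solution; infer_instance

-- ===== CLAIM (what is proved, stated in full; the proofs are below) =====
def Claim_equal_solution : Prop := ∀ (clothes : List (List String)), Dom_solution clothes → Pre_solution clothes → Spec_solution clothes (solution clothes)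

-- ===== LEMMAS AND PROOFS =====

-- removing every occurrence of k by filtering removes exactly (count k) elements
theorem length_filter_ne_add_count (l : List String) (k : String) :
    (l.filter (fun x => decide (x ≠ k))).length + l.count k = l.length := by
  induction l with
  | nil => simp
  | cons x xs ih =>
    simp only [decide_not] at ih ⊢
    by_cases h : x = k <;> simp [h] <;> omega

-- B's loop multiplies the accumulator by (count of k in cats + 1) for each distinct category k
theorem solution_alt_loop_eq_aux (n : Nat) : ∀ (cats : List String), cats.length ≤ n → ∀ (answer : Int),
    solution_alt_loop cats answer
      = answer * ((PySem.Set.ofList cats).map (fun k => (cats.count k : Int) + 1)).prod := by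
  induction n with
  | zero =>
    intro cats h answer
    have : cats = [] := List.eq_nil_of_length_eq_zero (by omega)
    subst this
    simp [solution_alt_loop, PySem.Set.ofList_nil]
  | succ n ih =>
    intro cats h answer
    match cats with
    | [] => simp [solution_alt_loop, PySem.Set.ofList_nil]
    | k :: cs =>
      rw [solution_alt_loop]
      set rest := (k :: cs).filter (fun x => decide (x ≠ k)) with hrest
      have hlen : rest.length + (k :: cs).count k = (k :: cs).length :=
        length_filter_ne_add_count (k :: cs) k
      have hrlen : rest.length ≤ n := by
        have : 1 ≤ (k :: cs).count k := by simp
        simp only [List.length_cons] at hlen h; omega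
      rw [ih rest hrlen]
      have hfac : (((k :: cs).length : Int) - (rest.length : Int) + 1)
          = ((k :: cs).count k : Int) + 1 := by omega
      rw [hfac]
      have hmapcongr : (PySem.Set.ofList rest).map (fun x => (rest.count x : Int) + 1)
          = (PySem.Set.ofList rest).map (fun x => ((k :: cs).count x : Int) + 1) := by
        apply List.map_congr_left
        intro x hx
        have hxr : x ∈ rest := (PySem.Set.mem_ofList rest x).1 hx
        have hxk : x ≠ k := by
          rw [hrest] at hxr
          have := (List.mem_filter.1 hxr).2
          simpa using this
        have : rest.count x = (k :: cs).count x := by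
          rw [hrest, List.count_filter]; simp [hxk]
        rw [this]
      have hperm : (PySem.Set.ofList rest).Perm (PySem.Set.discard (PySem.Set.ofList cs) k) := by
        rw [List.perm_ext_iff_of_nodup (PySem.Set.nodup_ofList rest)
          (PySem.Set.nodup_discard _ _ (PySem.Set.nodup_ofList cs))]
        intro x
        rw [PySem.Set.mem_ofList, PySem.Set.mem_discard, PySem.Set.mem_ofList, hrest]
        simp only [List.mem_filter, List.mem_cons]
        constructor
        · rintro ⟨hx1 | hx1, hx2⟩
          · simp at hx2; exact absurd hx1 (by simpa using hx2)
          · exact ⟨hx1, by simpa using hx2⟩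
        · rintro ⟨hx1, hx2⟩
          exact ⟨Or.inr hx1, by simpa using hx2⟩
      have hprod : ((PySem.Set.ofList rest).map (fun x => ((k :: cs).count x : Int) + 1)).prod
          = ((PySem.Set.discard (PySem.Set.ofList cs) k).map (fun x => ((k :: cs).count x : Int) + 1)).prod :=
        (hperm.map _).prod_eq
      rw [hmapcongr, hprod, PySem.Set.ofList_cons]
      simp only [List.map_cons, List.prod_cons]
      ring

-- A's multiply-accumulate fold over the keys is init times a product
theorem foldl_mul_map_prod (f : String → Int) (l : List String) (init : Int) :
    l.foldl (fun a k => a * (f k)) init = init * (l.map f).prod := by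
  induction l generalizing init with
  | nil => simp
  | cons x xs ih => simp [ih, mul_assoc]

theorem solution_eq_alt (clothes : List (List String)) : solution clothes = solution_alt clothes := by
  unfold solution solution_alt
  set cats := clothes.map (fun c => PySem.List.pyGetD c 1 "") with hcats
  have hdd : clothes.foldl (fun d c => d.modify (PySem.List.pyGetD c 1 "") 0 (· + 1)) PySem.Dict.empty
      = PySem.Dict.counter cats := by
    rw [PySem.Dict.counter_eq_foldl, hcats, List.foldl_map]
  rw [hdd]
  dsimp only
  rw [PySem.Dict.keys_counter]
  rw [foldl_mul_map_prod (fun k => (PySem.Dict.counter cats).getD k 0 + 1)]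
  rw [solution_alt_loop_eq_aux cats.length cats (le_refl _) 1]
  have : (PySem.Set.ofList cats).map (fun k => (PySem.Dict.counter cats).getD k 0 + 1)
      = (PySem.Set.ofList cats).map (fun k => (cats.count k : Int) + 1) := by
    apply List.map_congr_left
    intro x _
    rw [PySem.Dict.getD_counter]
  rw [this]

-- ===== VERDICT (by name: the statement is the Claim_ definition above) =====
theorem solution_spec : Claim_equal_solution := by
  intro clothes _ _
  unfold Spec_solution
  exact solution_eq_alt clothes
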